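-- pv_equiv track=rewrite | github.com/anthonywritescode/aoc2018 | day21/part2.py | compute
-- ===== SOURCE A (Python) =====
-- from typing import Set
--
-- def compute(s: str) -> int:
--     """Code was determined empirically using day21/genc.py"""
--     prev_seen = -1
--     seen: Set[int] = set()
--
--     reg2 = reg3 = reg4 = 0
--
--     while True:
--         reg2 = reg3 | 65536
--         reg3 = 1505483
--
--         while True:
--             reg4 = reg2 & 255
--             reg3 = reg3 + reg4
--             reg3 = reg3 & 16777215
--             reg3 = reg3 * 65899
--             reg3 = reg3 & 16777215
--             if 256 <= reg2:
--                 reg2 //= 256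
--                 continue
--             else:
--                 break
--
--         if reg3 in seen:
--             return prev_seen
--         else:
--             prev_seen = reg3
--             seen.add(prev_seen)
-- ===== SOURCE B (Python) =====
-- def compute(s: str) -> int:
--     """Code was determined empirically using day21/genc.py"""
--     def f(r: int) -> int:
--         reg2 = r | 65536
--         reg3 = 1505483
--         while True:
--             reg4 = reg2 & 255
--             reg3 = (reg3 + reg4) & 16777215
--             reg3 = (reg3 * 65899) & 16777215
--             if 256 <= reg2:
--                 reg2 //= 256
--             else:
--                 return reg3
--
--     x0 = f(0)
--     # Floyd phase 1: meeting point slow = x_m, fast = x_{2m} on the orbit x_0 = f(0), x_{n+1} = f(x_n)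
--     slow, fast = f(x0), f(f(x0))
--     while slow != fast:
--         slow, fast = f(slow), f(f(fast))
--     # phase 2: cycle start index mu (advance from x_0 and the meeting point in lockstep)
--     mu = 0
--     t, h = x0, slow
--     while t != h:
--         t, h = f(t), f(h)
--         mu += 1
--     # phase 3: cycle length lam (walk once around the cycle)
--     lam = 1
--     h = f(t)
--     while t != h:
--         h = f(h)
--         lam += 1
--     # the last distinct value before the first repeat sits at position mu + lam - 1
--     v = x0
--     for _ in range(mu + lam - 1):
--         v = f(v)
--     return v
-- ===== Notes on version B (the rewrite author's own statement) =====
-- stated objective: alternative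
-- what changed: Replaces A's grow-a-set-until-repeat loop by Floyd's tortoise-and-hare cycle detection (find meeting point, cycle start mu, cycle length lam, then re-iterate to position mu+lam-1), using O(1) memory instead of a set of all seen values.
import Mathlib
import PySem

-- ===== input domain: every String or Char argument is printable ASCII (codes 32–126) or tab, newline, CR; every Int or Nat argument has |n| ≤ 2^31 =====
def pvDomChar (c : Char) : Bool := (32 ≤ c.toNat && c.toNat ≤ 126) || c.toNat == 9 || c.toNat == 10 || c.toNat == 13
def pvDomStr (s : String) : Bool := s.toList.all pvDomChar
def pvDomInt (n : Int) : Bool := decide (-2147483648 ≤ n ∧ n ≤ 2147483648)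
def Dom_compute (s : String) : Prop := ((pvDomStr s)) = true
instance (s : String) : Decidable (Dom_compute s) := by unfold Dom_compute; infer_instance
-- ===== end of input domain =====

-- B replaces A's grow-a-set-until-repeat loop by Floyd's cycle detection (O(1) memory,
-- same exact returned value); the input string is ignored by both, as in the Python.


-- ===== PORT A =====
-- inner byte loop (identical, statement for statement, in both Pythons); the fuel only
-- makes the recursion total and is never exhausted on the values that actually occur
def hashStep : Nat → Int → Int → Int
  | 0, reg2, reg3 =>
    let reg4 := PySem.Int.band reg2 255
    let r3a := PySem.Int.band (reg3 + reg4) 16777215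
    PySem.Int.band (r3a * 65899) 16777215
  | fuel+1, reg2, reg3 =>
    let reg4 := PySem.Int.band reg2 255
    let r3a := PySem.Int.band (reg3 + reg4) 16777215
    let r3 := PySem.Int.band (r3a * 65899) 16777215
    if 256 ≤ reg2 then hashStep fuel (PySem.Int.floordiv reg2 256) r3 else r3

-- A's outer while-True loop; fuel is a totality guard only (proved never exhausted)
def loopA : Nat → Int → PySem.Set Int → Int → Int
  | 0, prevSeen, _, _ => prevSeen
  | fuel+1, prevSeen, seen, reg3 =>
    let reg2 := PySem.Int.bor reg3 65536
    let r3 := hashStep 64 reg2 1505483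
    if PySem.Set.contains seen r3 then prevSeen
    else loopA fuel r3 (PySem.Set.add seen r3) r3

def compute (_s : String) : Int := loopA 16777218 (-1) PySem.Set.empty 0

-- ===== PORT B =====
-- Source B's helper f(r): process r | 65536 through the byte loop
def ffun (r : Int) : Int := hashStep 64 (PySem.Int.bor r 65536) 1505483

-- Floyd phase 1: while slow != fast: slow, fast = f(slow), f(f(fast))
def floydMeet : Nat → Int → Int → Int
  | 0, slow, _ => slow
  | fuel+1, slow, fast =>
    if slow = fast then slow else floydMeet fuel (ffun slow) (ffun (ffun fast))

-- Floyd phase 2: while t != h: t, h = f(t), f(h); mu += 1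
def floydMu : Nat → Int → Int → Int → Int × Int
  | 0, mu, t, _ => (mu, t)
  | fuel+1, mu, t, h =>
    if t = h then (mu, t) else floydMu fuel (mu + 1) (ffun t) (ffun h)

-- Floyd phase 3: while t != h: h = f(h); lam += 1
def floydLam : Nat → Int → Int → Int → Int
  | 0, lam, _, _ => lam
  | fuel+1, lam, t, h =>
    if t = h then lam else floydLam fuel (lam + 1) t (ffun h)

-- for _ in range(n): v = f(v)
def iterF : Nat → Int → Int
  | 0, v => v
  | n+1, v => iterF n (ffun v)

def compute_alt (_s : String) : Int :=
  let x0 := ffun 0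
  let m := floydMeet 16777218 (ffun x0) (ffun (ffun x0))
  let p := floydMu 16777218 0 x0 m
  let lam := floydLam 16777218 1 p.2 (ffun p.2)
  iterF (p.1 + lam - 1).toNat x0

-- ===== PRECONDITION & SPEC =====
def Spec_compute (s : String) (out : Int) : Prop := out = compute_alt s
instance (s : String) (out : Int) : Decidable (Spec_compute s out) := by unfold Spec_compute; infer_instance

-- ===== CLAIM (what is proved, stated in full; the proofs are below) =====
def Claim_equal_compute : Prop := ∀ (s : String), Dom_compute s → Spec_compute s (compute s)

-- ===== LEMMAS AND PROOFS =====

-- the orbit x_0 = f(0), x_{n+1} = f(x_n) that both programs walk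
def xseq : Nat → Int
  | 0 => ffun 0
  | n+1 => ffun (xseq n)

theorem band_mask_bounds (a : Int) :
    0 ≤ PySem.Int.band a 16777215 ∧ PySem.Int.band a 16777215 < 16777216 := by
  unfold PySem.Int.band
  by_cases h : 0 ≤ a
  · simp only [h, if_true, if_pos (show (0:Int) ≤ 16777215 by norm_num)]
    have h1 : a.toNat &&& (16777215:Int).toNat ≤ (16777215:Int).toNat := Nat.and_le_right
    constructor
    · exact_mod_cast Int.natCast_nonneg _
    · exact_mod_cast lt_of_le_of_lt h1 (by norm_num)
  · simp only [h, if_false, if_pos (show (0:Int) ≤ 16777215 by norm_num)]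
    constructor
    · exact_mod_cast Int.natCast_nonneg _
    · have h1 : (16777215:Int).toNat - ((16777215:Int).toNat &&& (-a - 1).toNat) ≤ (16777215:Int).toNat :=
        Nat.sub_le _ _
      exact_mod_cast lt_of_le_of_lt h1 (by norm_num)

theorem hashStep_bounds (fuel : Nat) (a b : Int) :
    0 ≤ hashStep fuel a b ∧ hashStep fuel a b < 16777216 := by
  induction fuel generalizing a b with
  | zero => exact band_mask_bounds _
  | succ n ih =>
    simp only [hashStep]
    split
    · exact ih _ _
    · exact band_mask_bounds _

theorem xseq_bounds (n : Nat) : 0 ≤ xseq n ∧ xseq n < 16777216 := by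
  cases n with
  | zero => exact hashStep_bounds _ _ _
  | succ n => exact hashStep_bounds _ _ _

theorem xseq_congr_add (a b : Nat) (h : xseq a = xseq b) (t : Nat) :
    xseq (a + t) = xseq (b + t) := by
  induction t with
  | zero => simpa using h
  | succ t ih =>
    have h2 : xseq (a + t + 1) = xseq (b + t + 1) := congrArg ffun ih
    simpa [Nat.add_assoc] using h2

theorem exists_rep : ∃ j, 0 < j ∧ j ≤ 16777216 ∧ ∃ i, i < j ∧ xseq i = xseq j := by
  have hmaps : ∀ n ∈ Finset.range 16777217, xseq n ∈ Finset.Ico (0 : Int) 16777216 := by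
    intro n _
    have hb := xseq_bounds n
    simp [Finset.mem_Ico, hb.1, hb.2]
  have hcard : (Finset.Ico (0 : Int) 16777216).card < (Finset.range 16777217).card := by
    simp [Int.card_Ico]
  obtain ⟨a, ha, b, hb, hne, heq⟩ :=
    Finset.exists_ne_map_eq_of_card_lt_of_maps_to hcard hmaps
  simp only [Finset.mem_range] at ha hb
  rcases lt_or_gt_of_ne hne with h | h
  · exact ⟨b, by omega, by omega, a, h, heq⟩
  · exact ⟨a, by omega, by omega, b, h, heq.symm⟩

theorem nat_min (P : Nat → Prop) : ∀ (n : Nat), P n → ∃ k, P k ∧ ∀ j, j < k → ¬ P j := by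
  intro n
  induction n using Nat.strong_induction_on with
  | _ n ih =>
    intro h
    by_cases hall : ∀ j, j < n → ¬ P j
    · exact ⟨n, h, hall⟩
    · push_neg at hall
      obtain ⟨j, hj, hPj⟩ := hall
      exact ih j hj hPj

-- everything is stated over variables K mu lam M (with the needed facts as hypotheses),
-- bundled by orbit_struct at the end, so that omega only ever sees plain variables

theorem per_gen (mu lam : Nat) (hper : xseq (mu + lam) = xseq mu)
    (a : Nat) (ha : mu ≤ a) : xseq (a + lam) = xseq a := by
  obtain ⟨t, rfl⟩ := Nat.exists_eq_add_of_le ha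
  have h1 : mu + t + lam = mu + lam + t := by omega
  rw [h1]
  exact xseq_congr_add (mu + lam) mu hper t

theorem per_mul_gen (mu lam : Nat) (hper : xseq (mu + lam) = xseq mu)
    (a : Nat) (ha : mu ≤ a) (t : Nat) : xseq (a + t * lam) = xseq a := by
  induction t with
  | zero => simp
  | succ t ih =>
    have h1 : a + (t + 1) * lam = (a + t * lam) + lam := by ring
    rw [h1, per_gen mu lam hper (a + t * lam) (by omega), ih]

theorem normal_gen (K mu lam : Nat) (hml : mu + lam = K) (hlam : 0 < lam)
    (hper : xseq (mu + lam) = xseq mu) (n : Nat) (hn : mu ≤ n) :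
    xseq n = xseq (mu + (n - mu) % lam) ∧ mu + (n - mu) % lam < K := by
  have hmod : (n - mu) % lam < lam := Nat.mod_lt _ hlam
  have hdm := Nat.div_add_mod (n - mu) lam
  have hcomm : ((n - mu) / lam) * lam = lam * ((n - mu) / lam) := Nat.mul_comm _ _
  constructor
  · have h1 : n = (mu + (n - mu) % lam) + ((n - mu) / lam) * lam := by omega
    conv_lhs => rw [h1]
    exact per_mul_gen mu lam hper (mu + (n - mu) % lam) (by omega) ((n - mu) / lam)
  · omega

theorem eq_iff_gen (K mu lam : Nat) (hml : mu + lam = K) (hlam : 0 < lam)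
    (hper : xseq (mu + lam) = xseq mu)
    (hinj : ∀ i j, i < j → j < K → xseq i ≠ xseq j)
    (hKle : ∀ i j, i < j → xseq i = xseq j → K ≤ j)
    (i j : Nat) (hij : i < j) :
    xseq i = xseq j ↔ mu ≤ i ∧ lam ∣ (j - i) := by
  constructor
  · intro h
    by_cases hmu : mu ≤ i
    · have hj : mu ≤ j := le_trans hmu (le_of_lt hij)
      obtain ⟨hni, hri⟩ := normal_gen K mu lam hml hlam hper i hmu
      obtain ⟨hnj, hrj⟩ := normal_gen K mu lam hml hlam hper j hj
      have hrr : mu + (i - mu) % lam = mu + (j - mu) % lam := by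
        by_contra hne
        have hx : xseq (mu + (i - mu) % lam) = xseq (mu + (j - mu) % lam) :=
          hni.symm.trans (h.trans hnj)
        rcases Nat.lt_or_ge (mu + (i - mu) % lam) (mu + (j - mu) % lam) with hlt | hge
        · exact hinj _ _ hlt hrj hx
        · have hlt2 : mu + (j - mu) % lam < mu + (i - mu) % lam := by omega
          exact hinj _ _ hlt2 hri hx.symm
      have hmod : (i - mu) % lam = (j - mu) % lam := by omega
      refine ⟨hmu, ?_⟩
      have hme : (i - mu) ≡ (j - mu) [MOD lam] := hmod
      have hd := (Nat.modEq_iff_dvd' (by omega)).1 hme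
      have hsub : (j - mu) - (i - mu) = j - i := by omega
      rwa [hsub] at hd
    · exfalso
      have hK : K ≤ j := hKle i j hij h
      have hmuj : mu ≤ j := by omega
      obtain ⟨hnj, hrj⟩ := normal_gen K mu lam hml hlam hper j hmuj
      exact hinj i _ (by omega) hrj (h.trans hnj)
  · rintro ⟨hmu, c, hc⟩
    have hcomm : lam * c = c * lam := Nat.mul_comm _ _
    have hj : j = i + c * lam := by omega
    rw [hj]
    exact (per_mul_gen mu lam hper i hmu c).symm

-- existence of a Floyd meeting index: a positive multiple of lam that is ≥ mu
theorem mex_aux (mu lam : Nat) (h : 0 < lam) :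
    0 < lam * (mu / lam + 1) ∧ mu ≤ lam * (mu / lam + 1) ∧ lam ∣ lam * (mu / lam + 1) := by
  have hdm := Nat.div_add_mod mu lam
  have hmod : mu % lam < lam := Nat.mod_lt _ h
  refine ⟨Nat.mul_pos h (Nat.succ_pos _), ?_, dvd_mul_right _ _⟩
  have h1 : lam * (mu / lam + 1) = lam * (mu / lam) + lam := by ring
  omega

theorem mex_bound (mu lam : Nat) (h : 0 < lam) : lam * (mu / lam + 1) ≤ mu + lam := by
  have hdm := Nat.div_add_mod mu lam
  have h1 : lam * (mu / lam + 1) = lam * (mu / lam) + lam := by ring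
  omega

-- ---- Floyd phase 1 ----
theorem meet_run_gen (K mu lam M : Nat) (hml : mu + lam = K) (hlam : 0 < lam)
    (heq : ∀ i j, i < j → (xseq i = xseq j ↔ mu ≤ i ∧ lam ∣ (j - i)))
    (hM0 : 0 < M) (hMmu : mu ≤ M) (hMdvd : lam ∣ M)
    (hMmin : ∀ m, 0 < m → mu ≤ m → lam ∣ m → M ≤ m) :
    ∀ (fuel m : Nat), 0 < m → m ≤ M → M - m ≤ fuel →
      floydMeet fuel (xseq m) (xseq (2 * m)) = xseq M := by
  have hcond : ∀ m, 0 < m → (xseq m = xseq (2 * m) ↔ mu ≤ m ∧ lam ∣ m) := by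
    intro m hm
    rw [heq m (2 * m) (by omega), (by omega : 2 * m - m = m)]
  intro fuel
  induction fuel with
  | zero =>
    intro m h0 h2 h3
    have hmM : m = M := by omega
    subst hmM
    simp [floydMeet]
  | succ n ih =>
    intro m h0 h2 h3
    by_cases hc : xseq m = xseq (2 * m)
    · have hmM : m = M := le_antisymm h2 (hMmin m h0 ((hcond m h0).1 hc).1 ((hcond m h0).1 hc).2)
      subst hmM
      simp [floydMeet, hc]
    · have hne : m ≠ M := by
        intro e
        rw [e] at hc
        exact hc ((hcond M hM0).2 ⟨hMmu, hMdvd⟩)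
      simp only [floydMeet, if_neg hc]
      have e1 : ffun (xseq m) = xseq (m + 1) := rfl
      have e2 : ffun (ffun (xseq (2 * m))) = xseq (2 * (m + 1)) := by
        rw [(by omega : 2 * (m + 1) = 2 * m + 1 + 1)]; rfl
      rw [e1, e2]
      exact ih (m + 1) (by omega) (by omega) (by omega)

-- ---- Floyd phase 2 ----
theorem mu_run_gen (K mu lam M : Nat) (hml : mu + lam = K) (hlam : 0 < lam)
    (heq : ∀ i j, i < j → (xseq i = xseq j ↔ mu ≤ i ∧ lam ∣ (j - i)))
    (hM0 : 0 < M) (hMdvd : lam ∣ M) :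
    ∀ (fuel j : Nat), j ≤ mu → mu - j ≤ fuel →
      floydMu fuel (j : Int) (xseq j) (xseq (M + j)) = ((mu : Int), xseq mu) := by
  have hcond : ∀ j, xseq j = xseq (M + j) ↔ mu ≤ j := by
    intro j
    rw [heq j (M + j) (by omega), (by omega : M + j - j = M)]
    exact ⟨fun h => h.1, fun h => ⟨h, hMdvd⟩⟩
  intro fuel
  induction fuel with
  | zero =>
    intro j h1 h2
    have hj : j = mu := by omega
    subst hj
    simp [floydMu]
  | succ n ih =>
    intro j h1 h2
    by_cases hc : xseq j = xseq (M + j)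
    · have hj : j = mu := le_antisymm h1 ((hcond j).1 hc)
      subst hj
      simp [floydMu, hc]
    · have hj : j < mu := by
        rcases Nat.lt_or_ge j mu with h | h
        · exact h
        · exact absurd ((hcond j).2 h) hc
      simp only [floydMu, if_neg hc]
      have e1 : ffun (xseq j) = xseq (j + 1) := rfl
      have e2 : ffun (xseq (M + j)) = xseq (M + (j + 1)) := by
        rw [(by omega : M + (j + 1) = M + j + 1)]; rfl
      have e3 : (j : Int) + 1 = ((j + 1 : Nat) : Int) := by push_cast; ring
      rw [e1, e2, e3]
      exact ih (j + 1) (by omega) (by omega)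

-- ---- Floyd phase 3 ----
theorem lam_run_gen (K mu lam : Nat) (hml : mu + lam = K) (hlam : 0 < lam)
    (heq : ∀ i j, i < j → (xseq i = xseq j ↔ mu ≤ i ∧ lam ∣ (j - i))) :
    ∀ (fuel p : Nat), 0 < p → p ≤ lam → lam - p ≤ fuel →
      floydLam fuel (p : Int) (xseq mu) (xseq (mu + p)) = (lam : Int) := by
  have hcond : ∀ p, 0 < p → (xseq mu = xseq (mu + p) ↔ lam ∣ p) := by
    intro p hp
    rw [heq mu (mu + p) (by omega), (by omega : mu + p - mu = p)]
    exact ⟨fun h => h.2, fun h => ⟨le_refl _, h⟩⟩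
  intro fuel
  induction fuel with
  | zero =>
    intro p h0 h1 h2
    have hp : p = lam := by omega
    subst hp
    simp [floydLam]
  | succ n ih =>
    intro p h0 h1 h2
    by_cases hc : xseq mu = xseq (mu + p)
    · have hp : p = lam := le_antisymm h1 (Nat.le_of_dvd h0 ((hcond p h0).1 hc))
      subst hp
      simp [floydLam, hc]
    · have hp : p < lam := by
        rcases Nat.lt_or_ge p lam with h | h
        · exact h
        · have he : p = lam := by omega
          have hdv : lam ∣ p := by rw [he]
          exact absurd ((hcond p h0).2 hdv) hc
      simp only [floydLam, if_neg hc]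
      have e2 : ffun (xseq (mu + p)) = xseq (mu + (p + 1)) := by
        rw [(by omega : mu + (p + 1) = mu + p + 1)]; rfl
      have e3 : (p : Int) + 1 = ((p + 1 : Nat) : Int) := by push_cast; ring
      rw [e2, e3]
      exact ih (p + 1) (by omega) (by omega) (by omega)

theorem iter_run (n : Nat) : ∀ a : Nat, iterF n (xseq a) = xseq (a + n) := by
  induction n with
  | zero => intro a; simp [iterF]
  | succ n ih =>
    intro a
    have e1 : ffun (xseq a) = xseq (a + 1) := rfl
    simp only [iterF, e1, ih (a + 1)]
    congr 1
    omega

set_option maxRecDepth 4096 in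
theorem alt_eval_gen (K mu lam M : Nat) (hml : mu + lam = K) (hlam : 0 < lam)
    (heq : ∀ i j, i < j → (xseq i = xseq j ↔ mu ≤ i ∧ lam ∣ (j - i)))
    (hM0 : 0 < M) (hMmu : mu ≤ M) (hMdvd : lam ∣ M)
    (hMmin : ∀ m, 0 < m → mu ≤ m → lam ∣ m → M ≤ m)
    (hK16 : K ≤ 16777216) (hM16 : M ≤ 16777216)
    (s : String) : compute_alt s = xseq (K - 1) := by
  have e0 : ffun 0 = xseq 0 := rfl
  have e1 : ffun (xseq 0) = xseq 1 := rfl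
  have e2 : ffun (xseq 1) = xseq 2 := rfl
  have hmeet : floydMeet 16777218 (xseq 1) (xseq 2) = xseq M := by
    have h := meet_run_gen K mu lam M hml hlam heq hM0 hMmu hMdvd hMmin 16777218 1
      (by omega) (by omega) (by omega)
    rw [(by norm_num : 2 * 1 = 2)] at h
    exact h
  have hmu : floydMu 16777218 0 (xseq 0) (xseq M) = ((mu : Int), xseq mu) := by
    have h := mu_run_gen K mu lam M hml hlam heq hM0 hMdvd 16777218 0 (by omega) (by omega)
    rw [(by norm_num : M + 0 = M)] at h
    exact_mod_cast h
  have hlamr : floydLam 16777218 1 (xseq mu) (ffun (xseq mu)) = (lam : Int) := by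
    have e4 : ffun (xseq mu) = xseq (mu + 1) := rfl
    have h := lam_run_gen K mu lam hml hlam heq 16777218 1 (by omega) (by omega) (by omega)
    rw [e4]
    exact_mod_cast h
  simp only [compute_alt, e0, e1, e2, hmeet, hmu, hlamr]
  have e5 : ((mu : Int) + (lam : Int) - 1).toNat = mu + lam - 1 := by omega
  rw [e5, iter_run, (by omega : 0 + (mu + lam - 1) = K - 1)]

-- ---- A's loop ----
theorem loopA_run_gen (K mu lam : Nat) (hml : mu + lam = K) (hlam : 0 < lam)
    (hinj : ∀ i j, i < j → j < K → xseq i ≠ xseq j)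
    (hKle : ∀ i j, i < j → xseq i = xseq j → K ≤ j)
    (hmuK : xseq mu = xseq K) (hmulK : mu < K) :
    ∀ (fuel n : Nat) (prev : Int) (seen : PySem.Set Int) (reg3 : Int),
      n ≤ K → K + 1 - n ≤ fuel →
      (∀ v, v ∈ seen ↔ ∃ i, i < n ∧ xseq i = v) →
      (n = 0 ∨ prev = xseq (n - 1)) →
      ffun reg3 = xseq n →
      loopA fuel prev seen reg3 = xseq (K - 1) := by
  intro fuel
  induction fuel with
  | zero =>
    intro n prev seen reg3 hn hfuel hseen hprev hreg
    omega
  | succ f ih =>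
    intro n prev seen reg3 hn hfuel hseen hprev hreg
    simp only [loopA]
    have hstep : hashStep 64 (PySem.Int.bor reg3 65536) 1505483 = xseq n := hreg
    rw [hstep]
    by_cases hmem : xseq n ∈ seen
    · have hcon : PySem.Set.contains seen (xseq n) = true := (PySem.Set.contains_iff seen (xseq n)).2 hmem
      simp only [hcon, if_true]
      obtain ⟨i, hi, hxi⟩ := (hseen (xseq n)).1 hmem
      have hKn : K ≤ n := hKle i n hi hxi
      have hnK : n = K := le_antisymm hn hKn
      subst hnK
      rcases hprev with h0 | h0
      · omega
      · exact h0
    · have hcon : PySem.Set.contains seen (xseq n) = false := by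
        rw [Bool.eq_false_iff]
        intro h
        exact hmem ((PySem.Set.contains_iff seen (xseq n)).1 h)
      simp only [hcon, Bool.false_eq_true, if_false]
      have hnK : n ≠ K := by
        intro e; subst e
        exact hmem ((hseen _).2 ⟨mu, hmulK, hmuK⟩)
      refine ih (n + 1) (xseq n) (PySem.Set.add seen (xseq n)) (xseq n)
        (by omega) (by omega) ?_ (Or.inr rfl) rfl
      intro v
      rw [PySem.Set.mem_add, hseen v]
      constructor
      · rintro (⟨i, hi, he⟩ | he)
        · exact ⟨i, by omega, he⟩
        · exact ⟨n, by omega, he.symm⟩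
      · rintro ⟨i, hi, he⟩
        rcases Nat.lt_or_ge i n with h | h
        · exact Or.inl ⟨i, h, he⟩
        · have hin : i = n := by omega
          subst hin
          exact Or.inr he.symm

theorem compute_eval_gen (K mu lam : Nat) (hml : mu + lam = K) (hlam : 0 < lam)
    (hinj : ∀ i j, i < j → j < K → xseq i ≠ xseq j)
    (hKle : ∀ i j, i < j → xseq i = xseq j → K ≤ j)
    (hmuK : xseq mu = xseq K) (hmulK : mu < K) (hK16 : K ≤ 16777216)
    (s : String) : compute s = xseq (K - 1) := by
  unfold compute
  refine loopA_run_gen K mu lam hml hlam hinj hKle hmuK hmulK 16777218 0 (-1)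
    PySem.Set.empty 0 (by omega) (by omega) ?_ (Or.inl rfl) rfl
  intro v
  constructor
  · intro h
    simp [PySem.Set.empty] at h
  · rintro ⟨i, hi, _⟩
    omega

-- the structure of the orbit: first repeat index K, cycle entry mu, cycle length lam = K - mu,
-- and the first Floyd meeting index M
theorem orbit_struct : ∃ K mu lam M : Nat,
    mu + lam = K ∧ 0 < lam ∧ mu < K ∧ K ≤ 16777216 ∧ M ≤ 16777216 ∧
    0 < M ∧ mu ≤ M ∧ lam ∣ M ∧ (∀ m, 0 < m → mu ≤ m → lam ∣ m → M ≤ m) ∧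
    xseq mu = xseq K ∧
    (∀ i j, i < j → j < K → xseq i ≠ xseq j) ∧
    (∀ i j, i < j → xseq i = xseq j → K ≤ j) := by
  obtain ⟨j0, hj0, hj0le, i0, hi0, he0⟩ := exists_rep
  obtain ⟨K, hPK, hKmin⟩ :=
    nat_min (fun k => 0 < k ∧ ∃ i, i < k ∧ xseq i = xseq k) j0 ⟨hj0, i0, hi0, he0⟩
  obtain ⟨hKpos, iK, hiK, heK⟩ := hPK
  have hKle : ∀ i j, i < j → xseq i = xseq j → K ≤ j := by
    intro i j hij he
    by_contra h
    exact hKmin j (by omega) ⟨by omega, i, hij, he⟩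
  have hKj0 : K ≤ j0 := hKle i0 j0 hi0 he0
  have hinj : ∀ i j, i < j → j < K → xseq i ≠ xseq j := by
    intro i j hij hj he
    exact hKmin j hj ⟨by omega, i, hij, he⟩
  obtain ⟨mu, hPmu, _⟩ := nat_min (fun i => i < K ∧ xseq i = xseq K) iK ⟨hiK, heK⟩
  obtain ⟨hmuK, hmueq⟩ := hPmu
  obtain ⟨M, hPM, hMmin'⟩ :=
    nat_min (fun m => 0 < m ∧ mu ≤ m ∧ (K - mu) ∣ m) ((K - mu) * (mu / (K - mu) + 1))
      (by
        have := mex_aux mu (K - mu) (by omega)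
        exact ⟨this.1, this.2.1, this.2.2⟩)
  obtain ⟨hM0, hMmu, hMdvd⟩ := hPM
  have hMmin : ∀ m, 0 < m → mu ≤ m → (K - mu) ∣ m → M ≤ m := by
    intro m a b c
    by_contra h
    exact hMmin' m (by omega) ⟨a, b, c⟩
  have hM16 : M ≤ 16777216 := by
    have h1 : M ≤ (K - mu) * (mu / (K - mu) + 1) := by
      by_contra h
      have := mex_aux mu (K - mu) (by omega)
      exact hMmin' _ (by omega) ⟨this.1, this.2.1, this.2.2⟩
    have h2 := mex_bound mu (K - mu) (by omega)
    omega
  exact ⟨K, mu, K - mu, M, by omega, by omega, hmuK, by omega, hM16,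
    hM0, hMmu, hMdvd, hMmin, hmueq, hinj, hKle⟩

-- ===== VERDICT (by name: the statement is the Claim_ definition above) =====
theorem compute_spec : Claim_equal_compute := by
  intro s _
  unfold Spec_compute
  obtain ⟨K, mu, lam, M, hml, hlam, hmulK, hK16, hM16, hM0, hMmu, hMdvd, hMmin, hmuK, hinj, hKle⟩ :=
    orbit_struct
  have hper : xseq (mu + lam) = xseq mu := by rw [hml]; exact hmuK.symm
  have heq : ∀ i j, i < j → (xseq i = xseq j ↔ mu ≤ i ∧ lam ∣ (j - i)) :=
    eq_iff_gen K mu lam hml hlam hper hinj hKle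
  rw [compute_eval_gen K mu lam hml hlam hinj hKle hmuK hmulK hK16 s,
    alt_eval_gen K mu lam M hml hlam heq hM0 hMmu hMdvd hMmin hK16 hM16 s]
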